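-- pv_equiv track=rewrite | github.com/Prakhar2025/EthAum-Venture-Partners | ethaum-ai/backend/services/matchmaking.py | _category_score
-- ===== SOURCE A (Python) =====
-- def _category_score(product_category: str, buyer_categories: list[str]) -> tuple[int, str]:
--     """40% weight bucket — healthcare category alignment."""
--     cat = (product_category or "").lower().replace(" ", "_")
--     if cat in [c.lower() for c in buyer_categories]:
--         return 40, f"Strong category fit: {cat.replace('_', ' ').title()}"
--     # Partial — any keyword overlap
--     for bc in buyer_categories:
--         if bc.lower() in cat or cat in bc.lower():
--             return 20, "Partial category alignment"
--     return 0, ""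
-- ===== SOURCE B (Python) =====
-- def _category_score(product_category: str, buyer_categories: list[str]) -> tuple[int, str]:
--     """Single pass: exact match returns immediately; partial overlap is just flagged."""
--     cat = (product_category or "").lower().replace(" ", "_")
--     found_partial = False
--     for bc in buyer_categories:
--         lc = bc.lower()
--         if lc == cat:
--             return 40, f"Strong category fit: {cat.replace('_', ' ').title()}"
--         found_partial = found_partial or lc in cat or cat in lc
--     return (20, "Partial category alignment") if found_partial else (0, "")
-- ===== Notes on version B (the rewrite author's own statement) =====
-- stated objective: simpler
-- what changed: B replaces A's two traversals (a list-comprehension membership test over all lowered categories, then a second substring-overlap loop) with one pass that returns immediately on an exact match and merely maintains a found_partial flag, deciding 20-vs-0 after the loop.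
import Mathlib
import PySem

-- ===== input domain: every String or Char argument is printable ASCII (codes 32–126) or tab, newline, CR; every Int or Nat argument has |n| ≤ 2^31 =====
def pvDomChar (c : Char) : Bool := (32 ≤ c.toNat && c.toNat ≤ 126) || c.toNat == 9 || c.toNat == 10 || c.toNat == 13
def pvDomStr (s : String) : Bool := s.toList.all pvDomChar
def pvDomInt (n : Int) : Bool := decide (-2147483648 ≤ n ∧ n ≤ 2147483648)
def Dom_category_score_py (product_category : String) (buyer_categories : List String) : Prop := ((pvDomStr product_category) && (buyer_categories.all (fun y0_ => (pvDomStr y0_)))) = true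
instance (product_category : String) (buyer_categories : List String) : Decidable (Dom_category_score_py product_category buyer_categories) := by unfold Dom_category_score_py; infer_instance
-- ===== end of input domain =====

-- B merges A's membership scan and partial-overlap loop into ONE pass maintaining a found_partial flag (objective: simpler).

-- hand port of str.title() (PySem has no title): a letter after a non-letter is
-- uppercased, a letter after a letter is lowercased; exact for the ASCII domain,
-- where Python's "cased" characters are exactly the letters.
def pvTitleChars (prevAlpha : Bool) : List Char → List Char
  | [] => []
  | c :: t =>
    (if PySem.Chars.isalpha c then
        (if prevAlpha then PySem.Chars.lowerChar c else PySem.Chars.upperChar c)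
      else c) :: pvTitleChars (PySem.Chars.isalpha c) t

def pvTitle (s : String) : String := String.ofList (pvTitleChars false s.toList)

-- ===== PORT A =====
-- A's second loop ("for bc in buyer_categories: …") as structural recursion
def pvALoop (cat : String) : List String → Int × String
  | [] => (0, "")
  | bc :: rest =>
    if PySem.Str.isIn (PySem.Str.lower bc) cat || PySem.Str.isIn cat (PySem.Str.lower bc) then
      (20, "Partial category alignment")
    else pvALoop cat rest

def category_score_py (product_category : String) (buyer_categories : List String) : Int × String :=
  -- (product_category or "") = product_category for the String type (falsy "" maps to "")
  let cat := PySem.Str.replace (PySem.Str.lower product_category) " " "_"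
  if (buyer_categories.map PySem.Str.lower).contains cat then
    (40, "Strong category fit: " ++ pvTitle (PySem.Str.replace cat "_" " "))
  else pvALoop cat buyer_categories

-- ===== PORT B =====
-- B's single loop with the found_partial accumulator
def pvBLoop (cat : String) (foundPartial : Bool) : List String → Int × String
  | [] => if foundPartial then (20, "Partial category alignment") else (0, "")
  | bc :: rest =>
    let lc := PySem.Str.lower bc
    if lc == cat then
      (40, "Strong category fit: " ++ pvTitle (PySem.Str.replace cat "_" " "))
    else pvBLoop cat (foundPartial || PySem.Str.isIn lc cat || PySem.Str.isIn cat lc) rest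

def category_score_py_alt (product_category : String) (buyer_categories : List String) : Int × String :=
  let cat := PySem.Str.replace (PySem.Str.lower product_category) " " "_"
  pvBLoop cat false buyer_categories

-- ===== PRECONDITION & SPEC =====
def Spec_category_score_py (product_category : String) (buyer_categories : List String) (out : Int × String) : Prop := out = category_score_py_alt product_category buyer_categories
instance (product_category : String) (buyer_categories : List String) (out : Int × String) : Decidable (Spec_category_score_py product_category buyer_categories out) := by unfold Spec_category_score_py; infer_instance

-- ===== CLAIM (what is proved, stated in full; the proofs are below) =====
def Claim_equal_category_score_py : Prop := ∀ (product_category : String) (buyer_categories : List String), Dom_category_score_py product_category buyer_categories → Spec_category_score_py product_category buyer_categories (category_score_py product_category buyer_categories)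

-- ===== LEMMAS AND PROOFS =====

-- A's partial loop returns (20,…) iff some bc overlaps
theorem pvALoop_eq (cat : String) (bcs : List String) :
    pvALoop cat bcs =
      if bcs.any (fun bc => PySem.Str.isIn (PySem.Str.lower bc) cat || PySem.Str.isIn cat (PySem.Str.lower bc)) then
        (20, "Partial category alignment")
      else (0, "") := by
  induction bcs with
  | nil => rfl
  | cons bc rest ih =>
    simp only [pvALoop, List.any_cons]
    by_cases h : PySem.Chars.isIn (PySem.Chars.lower bc.toList) cat.toList = true ∨ PySem.Chars.isIn cat.toList (PySem.Chars.lower bc.toList) = true <;>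
      simp [h, ih]

-- B's loop, characterised: exact match anywhere wins; otherwise the flag or any overlap decides
theorem pvBLoop_eq (cat : String) (bcs : List String) (fp : Bool) :
    pvBLoop cat fp bcs =
      if (bcs.map PySem.Str.lower).contains cat then
        (40, "Strong category fit: " ++ pvTitle (PySem.Str.replace cat "_" " "))
      else if fp || bcs.any (fun bc => PySem.Str.isIn (PySem.Str.lower bc) cat || PySem.Str.isIn cat (PySem.Str.lower bc)) then
        (20, "Partial category alignment")
      else (0, "") := by
  induction bcs generalizing fp with
  | nil => cases fp <;> rfl
  | cons bc rest ih =>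
    simp only [pvBLoop, List.map_cons, List.contains_cons, List.any_cons]
    rw [ih]
    by_cases h : PySem.Str.lower bc = cat
    · simp [h]
    · have h1 : (PySem.Str.lower bc == cat) = false := beq_eq_false_iff_ne.mpr h
      have h2 : (cat == PySem.Str.lower bc) = false := beq_eq_false_iff_ne.mpr (Ne.symm h)
      simp [h1, h2, or_assoc]

-- ===== VERDICT (by name: the statement is the Claim_ definition above) =====
theorem category_score_py_spec : Claim_equal_category_score_py := by
  intro pc bcs _
  unfold Spec_category_score_py category_score_py category_score_py_alt
  simp only [pvBLoop_eq, pvALoop_eq, Bool.false_or]
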